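-- pv_equiv track=rewrite | github.com/boost-devs/coding-test-study | coodingpenguin/brute_force/1548_부분삼각수열.py | result
-- ===== SOURCE A (Python) =====
-- from itertools import combinations
--
-- def result(n:int, arr:list):
--     # 수열 크기가 3이하인 경우
--     if n < 3:
--         return n    # 수열 크기만큼이 최대 길이
--     combs = combinations(range(n), 3)
--     max_length = 2  # 수열 최대 길이
--     for a, b, c in combs:
--         # 삼각 수열을 만족한다면
--         if arr[a] + arr[b] > arr[c]:
--             # b와 c 사이의 요소를 포함한 수열이 최대 수열
--             max_length = max(max_length, c-b+2)
--     return max_length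
-- ===== SOURCE B (Python) =====
-- def result(n: int, arr: list):
--     # Length <= 2: the whole sequence is the answer.
--     if n < 3:
--         return n
--     best = 2
--     pref = arr[0]  # max of arr[0..b-1]
--     for b in range(1, n - 1):
--         s = pref + arr[b]
--         # scan c from the top: the first valid c gives the best score for this b
--         for c in range(n - 1, b, -1):
--             if s > arr[c]:
--                 best = max(best, c - b + 2)
--                 break
--         if arr[b] > pref:
--             pref = arr[b]
--     return best
-- ===== Notes on version B (the rewrite author's own statement) =====
-- stated objective: faster
-- what changed: Replaces the O(n^3) scan over all index triples (a,b,c) by a running prefix maximum: since only c-b+2 is scored, a valid a<b exists iff max(arr[0..b-1])+arr[b] > arr[c], so B checks each pair (b,c) once.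
import Mathlib
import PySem

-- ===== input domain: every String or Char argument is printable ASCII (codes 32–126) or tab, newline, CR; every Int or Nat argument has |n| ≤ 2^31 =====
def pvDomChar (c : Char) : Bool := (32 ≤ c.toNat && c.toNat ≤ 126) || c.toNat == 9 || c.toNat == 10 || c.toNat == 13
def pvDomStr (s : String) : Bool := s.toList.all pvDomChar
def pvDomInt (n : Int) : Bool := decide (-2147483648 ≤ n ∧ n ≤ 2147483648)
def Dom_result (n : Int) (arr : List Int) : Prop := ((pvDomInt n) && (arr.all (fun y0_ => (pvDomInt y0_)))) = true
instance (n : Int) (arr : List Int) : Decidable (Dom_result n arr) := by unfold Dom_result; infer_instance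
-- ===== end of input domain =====

-- B replaces A's O(n^3) triple scan by a prefix-maximum over a, checking each pair (b,c) once (asymptotically faster).

-- arr[i] for a nonnegative in-range index (Pre_result keeps the accessed indices in range)
def pvGv (arr : List Int) (i : Nat) : Int := (PySem.List.pyGet? arr (i : Int)).getD 0

-- "m = init; for x in l: if p x: m = max(m, v x); return m"  (shared loop shape of both ports)
def pvCmax {α : Type} (p : α → Bool) (v : α → Int) (init : Int) (l : List α) : Int :=
  l.foldl (fun m x => if p x then max m (v x) else m) init

-- ===== PORT A =====
def result (n : Int) (arr : List Int) : Int :=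
  if n < 3 then n
  else
    let nn := n.toNat
    -- combinations(range(n), 3) in lexicographic order
    let combs := (List.range nn).flatMap (fun a =>
      (List.range' (a+1) (nn - (a+1))).flatMap (fun b =>
        (List.range' (b+1) (nn - (b+1))).map (fun c => (a, b, c))))
    pvCmax (fun t => pvGv arr t.1 + pvGv arr t.2.1 > pvGv arr t.2.2)
           (fun t => (t.2.2 : Int) - (t.2.1 : Int) + 2) 2 combs

-- ===== PORT B =====
-- the inner loop "for c in range(n-1, b, -1): if s > arr[c]: best = max(best, c-b+2); break"
-- (o is the first c from the top satisfying the test, none if the loop falls through)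
def pvInner (best : Int) (o : Option Nat) (b : Nat) : Int :=
  match o with
  | some c => max best ((c : Int) - (b : Int) + 2)
  | none => best

def result_alt (n : Int) (arr : List Int) : Int :=
  if n < 3 then n
  else
    let nn := n.toNat
    ((List.range' 1 (nn - 2)).foldl (fun st b =>
      let s := st.2 + pvGv arr b
      let best := pvInner st.1
        ((List.range' (b+1) (nn - (b+1))).reverse.find? (fun c => s > pvGv arr c)) b
      (best, if pvGv arr b > st.2 then pvGv arr b else st.2))
      (2, pvGv arr 0)).1

-- ===== PRECONDITION & SPEC =====
-- For n ≥ 3 both Pythons index arr at 0..n-1, so A raises IndexError unless n ≤ len(arr); Pre_ excludes exactly those raising inputs.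
def Pre_result (n : Int) (arr : List Int) : Prop := n < 3 ∨ n ≤ arr.length
instance (n : Int) (arr : List Int) : Decidable (Pre_result n arr) := by unfold Pre_result; infer_instance
def pvWitness_result : Int × List Int := (4, [1, 2, 3, 4])

def Spec_result (n : Int) (arr : List Int) (out : Int) : Prop := out = result_alt n arr
instance (n : Int) (arr : List Int) (out : Int) : Decidable (Spec_result n arr out) := by unfold Spec_result; infer_instance

-- ===== CLAIM (what is proved, stated in full; the proofs are below) =====
def Claim_equal_result : Prop := ∀ (n : Int) (arr : List Int), Dom_result n arr → Pre_result n arr → Spec_result n arr (result n arr)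

-- ===== LEMMAS AND PROOFS =====

-- prefix maximum  pvPm arr k = max(arr[0..k])
def pvPm (arr : List Int) : Nat → Int
  | 0 => pvGv arr 0
  | k + 1 => max (pvPm arr k) (pvGv arr (k + 1))

theorem pvCmax_init_le {α : Type} (p : α → Bool) (v : α → Int) (l : List α) (init : Int) :
    init ≤ pvCmax p v init l := by
  induction l generalizing init with
  | nil => simp [pvCmax]
  | cons x xs ih =>
    simp only [pvCmax, List.foldl_cons]
    split
    · exact le_trans (le_max_left _ _) (ih _)
    · exact ih _
theorem pvCmax_le_of_mem {α : Type} {p : α → Bool} {v : α → Int} {l : List α} {x : α}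
    (hx : x ∈ l) (hp : p x = true) (init : Int) : v x ≤ pvCmax p v init l := by
  induction l generalizing init with
  | nil => cases hx
  | cons y ys ih =>
    simp only [pvCmax, List.foldl_cons]
    rcases List.mem_cons.1 hx with h | h
    · subst h; rw [hp, if_pos rfl]
      exact le_trans (le_max_right _ _) (pvCmax_init_le _ _ _ _)
    · split <;> exact ih h _
theorem pvCmax_le {α : Type} {p : α → Bool} {v : α → Int} {l : List α} {init M : Int}
    (h0 : init ≤ M) (h : ∀ x ∈ l, p x = true → v x ≤ M) : pvCmax p v init l ≤ M := by
  induction l generalizing init with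
  | nil => simpa [pvCmax] using h0
  | cons y ys ih =>
    simp only [pvCmax, List.foldl_cons]
    split
    · next hp =>
      exact ih (max_le h0 (h y (List.mem_cons_self) hp)) (fun x hx => h x (List.mem_cons_of_mem _ hx))
    · exact ih h0 (fun x hx => h x (List.mem_cons_of_mem _ hx))
theorem pvCmax_append {α : Type} (p : α → Bool) (v : α → Int) (init : Int) (l₁ l₂ : List α) :
    pvCmax p v init (l₁ ++ l₂) = pvCmax p v (pvCmax p v init l₁) l₂ := by
  simp [pvCmax, List.foldl_append]
theorem pvCmax_map {α β : Type} (f : α → β) (p : β → Bool) (v : β → Int) (init : Int) (l : List α) :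
    pvCmax p v init (l.map f) = pvCmax (fun a => p (f a)) (fun a => v (f a)) init l := by
  simp [pvCmax, List.foldl_map]

theorem pvPm_ge (arr : List Int) {a k : Nat} (h : a ≤ k) : pvGv arr a ≤ pvPm arr k := by
  induction k with
  | zero => interval_cases a; simp [pvPm]
  | succ k ih =>
    rcases Nat.lt_or_ge a (k+1) with h' | h'
    · exact le_trans (ih (Nat.lt_succ_iff.1 h')) (le_max_left _ _)
    · have : a = k + 1 := le_antisymm h h'
      subst this; exact le_max_right _ _
theorem pvPm_exists (arr : List Int) (k : Nat) : ∃ a ≤ k, pvPm arr k = pvGv arr a := by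
  induction k with
  | zero => exact ⟨0, le_refl 0, rfl⟩
  | succ k ih =>
    rcases ih with ⟨a, ha, he⟩
    rcases max_cases (pvPm arr k) (pvGv arr (k+1)) with ⟨h1, _⟩ | ⟨h1, _⟩
    · exact ⟨a, Nat.le_succ_of_le ha, by simp only [pvPm]; rw [h1, he]⟩
    · exact ⟨k+1, le_refl _, by simp only [pvPm]; rw [h1]⟩

-- the pairs (b, c) scanned by B, for b ∈ range' s m
def pvPairs (nn s m : Nat) : List (Nat × Nat) :=
  (List.range' s m).flatMap (fun b => (List.range' (b+1) (nn - (b+1))).map (fun c => (b, c)))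

def pvP (arr : List Int) (t : Nat × Nat) : Bool := pvPm arr (t.1 - 1) + pvGv arr t.1 > pvGv arr t.2
def pvV (t : Nat × Nat) : Int := (t.2 : Int) - (t.1 : Int) + 2

-- the break-at-first-hit downward scan equals the max over the whole inner range
theorem pvInner_eq (arr : List Int) (s : Int) (b : Nat) (best : Int) (l : List Nat)
    (hmono : l.Pairwise (· < ·)) :
    pvInner best (l.reverse.find? (fun c => s > pvGv arr c)) b
      = pvCmax (fun c => s > pvGv arr c) (fun c => (c : Int) - (b : Int) + 2) best l := by
  induction l using List.reverseRecOn with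
  | nil => simp [pvInner, pvCmax]
  | append_singleton l c ih =>
    rw [List.pairwise_append] at hmono
    obtain ⟨hl, _, hcv⟩ := hmono
    rw [List.reverse_append, List.reverse_singleton, List.singleton_append, List.find?_cons,
        pvCmax_append]
    by_cases hc : s > pvGv arr c
    · simp only [hc, decide_true]
      have h1 : pvCmax (fun c => decide (s > pvGv arr c)) (fun c => (c : Int) - (b : Int) + 2)
          best l ≤ max best ((c : Int) - (b : Int) + 2) := by
        apply pvCmax_le (le_max_left _ _)
        intro x hx _
        have : (x : Int) - (b : Int) + 2 ≤ (c : Int) - (b : Int) + 2 := by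
          have : (x : Int) ≤ (c : Int) := by exact_mod_cast Nat.le_of_lt (hcv x hx c (List.mem_singleton_self c))
          omega
        exact le_trans this (le_max_right _ _)
      have h2 : best ≤ pvCmax (fun c => decide (s > pvGv arr c))
          (fun c => (c : Int) - (b : Int) + 2) best l := pvCmax_init_le _ _ _ _
      simp only [pvInner, pvCmax, List.foldl_cons, List.foldl_nil, hc, decide_true, if_true]
      exact le_antisymm (max_le_max h2 le_rfl) (max_le h1 (le_max_right _ _))
    · simp only [hc, decide_false]
      rw [ih hl]
      simp [pvCmax, hc]

-- B's outer loop, characterised: starting from pref = pvPm (s-1), it computes pvCmax over pvPairs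
theorem pvOuter (arr : List Int) (nn : Nat) (m : Nat) :
    ∀ (s : Nat), 1 ≤ s → ∀ (best : Int),
    (List.range' s m).foldl (fun st b =>
      let sσ := st.2 + pvGv arr b
      let bst := pvInner st.1
        ((List.range' (b+1) (nn - (b+1))).reverse.find? (fun c => sσ > pvGv arr c)) b
      (bst, if pvGv arr b > st.2 then pvGv arr b else st.2))
      (best, pvPm arr (s - 1))
    = (pvCmax (pvP arr) pvV best (pvPairs nn s m), pvPm arr (s - 1 + m)) := by
  induction m with
  | zero => intro s hs best; simp [pvPairs, pvCmax]
  | succ m ih =>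
    intro s hs best
    rw [List.range'_succ, List.foldl_cons]
    simp only
    rw [pvInner_eq arr _ s _ _ (List.pairwise_lt_range' 1)]
    have hpm : (if pvGv arr s > pvPm arr (s-1) then pvGv arr s else pvPm arr (s-1))
        = pvPm arr ((s+1) - 1) := by
      have hs' : s - 1 + 1 = s := Nat.succ_pred_eq_of_pos hs
      have : pvPm arr s = max (pvPm arr (s-1)) (pvGv arr s) := by
        have h : pvPm arr ((s-1)+1) = max (pvPm arr (s-1)) (pvGv arr ((s-1)+1)) := by
          simp only [pvPm]
        rwa [hs'] at h
      simp only [Nat.add_sub_cancel, this, max_def]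
      split <;> split <;> omega
    rw [hpm, ih (s+1) (by omega)]
    have hpairs : pvPairs nn s (m+1)
        = ((List.range' (s+1) (nn - (s+1))).map (fun c => (s, c))) ++ pvPairs nn (s+1) m := by
      simp [pvPairs, List.range'_succ]
    have hinner : pvCmax (fun c => pvPm arr (s-1) + pvGv arr s > pvGv arr c)
          (fun c => (c : Int) - (s : Int) + 2) best (List.range' (s+1) (nn - (s+1)))
        = pvCmax (pvP arr) pvV best ((List.range' (s+1) (nn - (s+1))).map (fun c => (s, c))) := by
      rw [pvCmax_map]; rfl
    rw [hpairs, pvCmax_append, ← hinner]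
    have : s + 1 - 1 + m = s - 1 + (m + 1) := by omega
    rw [this]

theorem pv_mem_pairs {nn : Nat} {b c : Nat} (h3 : 3 ≤ nn) (hb : 1 ≤ b) (hbc : b < c) (hc : c < nn) :
    (b, c) ∈ pvPairs nn 1 (nn - 2) := by
  simp only [pvPairs, List.mem_flatMap, List.mem_range'_1, List.mem_map]
  exact ⟨b, ⟨by omega, by omega⟩, c, ⟨by omega, by omega⟩, rfl⟩

-- ===== VERDICT (by name: the statement is the Claim_ definition above) =====
theorem result_spec : Claim_equal_result := by
  intro n arr _ _
  unfold Spec_result result result_alt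
  by_cases hn : n < 3
  · simp [hn]
  · simp only [hn, if_false]
    set nn := n.toNat with hnn
    have h3 : 3 ≤ nn := by omega
    have hB := congrArg Prod.fst (pvOuter arr nn (nn - 2) 1 (le_refl 1) 2)
    refine Eq.trans ?_ hB.symm
    apply le_antisymm
    · -- A ≤ B
      apply pvCmax_le (pvCmax_init_le _ _ _ _)
      intro t ht hp
      simp only [List.mem_flatMap, List.mem_range, List.mem_range'_1, List.mem_map] at ht
      obtain ⟨a, ha, b, ⟨hb1, hb2⟩, c, ⟨hc1, hc2⟩, rfl⟩ := ht
      have hab : a < b := by omega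
      have hbc : b < c := by omega
      have hcn : c < nn := by omega
      have hmem : (b, c) ∈ pvPairs nn 1 (nn - 2) := pv_mem_pairs h3 (by omega) hbc hcn
      have hP : pvP arr (b, c) = true := by
        simp only [pvP, decide_eq_true_eq]
        have h1 : pvGv arr a ≤ pvPm arr (b - 1) := pvPm_ge arr (by omega)
        simp only [decide_eq_true_eq] at hp
        omega
      exact pvCmax_le_of_mem hmem hP 2
    · -- B ≤ A
      apply pvCmax_le (pvCmax_init_le _ _ _ _)
      intro t ht hp
      simp only [pvPairs, List.mem_flatMap, List.mem_range'_1, List.mem_map] at ht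
      obtain ⟨b, ⟨hb1', hb2'⟩, c, ⟨hc1', hc2'⟩, rfl⟩ := ht
      have hb1 : 1 ≤ b := by omega
      have hbc : b < c := by omega
      have hcn : c < nn := by omega
      simp only [pvP, decide_eq_true_eq] at hp
      obtain ⟨a, ha, hpm⟩ := pvPm_exists arr (b - 1)
      have hab : a < b := by omega
      have hmem : (a, b, c) ∈ (List.range nn).flatMap (fun a =>
          (List.range' (a+1) (nn - (a+1))).flatMap (fun b =>
            (List.range' (b+1) (nn - (b+1))).map (fun c => (a, b, c)))) := by
        simp only [List.mem_flatMap, List.mem_range, List.mem_range'_1, List.mem_map]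
        exact ⟨a, by omega, b, ⟨by omega, by omega⟩, c, ⟨by omega, by omega⟩, rfl⟩
      have hP : (fun t : Nat × Nat × Nat => decide (pvGv arr t.1 + pvGv arr t.2.1 > pvGv arr t.2.2)) (a, b, c) = true := by
        simp only [decide_eq_true_eq]
        omega
      exact pvCmax_le_of_mem hmem hP 2
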